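-- pv_equiv track=rewrite | github.com/luchi-cicchelli/juego_auto_LuciaCicchelli | mapa.py | generar_mapa_carretera
-- ===== SOURCE A (Python) =====
-- def generar_mapa_carretera(filas, columnas):
--     """Genera un mapa de carretera representado por una matriz de 0 y 1.
--
--     Cada celda en la matriz puede ser un 0 o un 1, donde los 1 representan las zonas de la carretera
--     y los 0 las zonas vacías o sin carretera. La matriz es de tamaño filas x columnas.
--     Los 1 se colocan en las posiciones donde tanto el índice de fila es par como el índice de columna
--     es múltiplo de 3.
--
--     Args:
--         filas (int): El número de filas del mapa.
--         columnas (int): El número de columnas del mapa.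
--
--     Returns:
--         lista: Una lista de listas (matriz) que representa el mapa de la carretera.
--               Los valores de la matriz son 0s y 1s, donde 1 representa una sección de la carretera.
--     """
--     mapa = []
--     for i in range(filas):
--         fila = []
--         for j in range(columnas):
--             if i % 2 == 0 and j % 3 == 0:
--                 fila.append(1)
--             else:
--                 fila.append(0)
--         mapa.append(fila)
--     return mapa
-- ===== SOURCE B (Python) =====
-- def generar_mapa_carretera(filas, columnas):
--     """Same map, built from two precomputed row templates (even-row pattern / zero row)."""
--     if filas <= 0:
--         return []
--     fila_par = [1 if j % 3 == 0 else 0 for j in range(columnas)]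
--     fila_cero = [0] * columnas
--     return [list(fila_par) if i % 2 == 0 else list(fila_cero) for i in range(filas)]
-- ===== Notes on version B (the rewrite author's own statement) =====
-- stated objective: simpler
-- what changed: B precomputes two row templates (even-row pattern and zero row) once and selects a copy per row, removing the per-cell branch of A's nested loops.
import Mathlib
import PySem

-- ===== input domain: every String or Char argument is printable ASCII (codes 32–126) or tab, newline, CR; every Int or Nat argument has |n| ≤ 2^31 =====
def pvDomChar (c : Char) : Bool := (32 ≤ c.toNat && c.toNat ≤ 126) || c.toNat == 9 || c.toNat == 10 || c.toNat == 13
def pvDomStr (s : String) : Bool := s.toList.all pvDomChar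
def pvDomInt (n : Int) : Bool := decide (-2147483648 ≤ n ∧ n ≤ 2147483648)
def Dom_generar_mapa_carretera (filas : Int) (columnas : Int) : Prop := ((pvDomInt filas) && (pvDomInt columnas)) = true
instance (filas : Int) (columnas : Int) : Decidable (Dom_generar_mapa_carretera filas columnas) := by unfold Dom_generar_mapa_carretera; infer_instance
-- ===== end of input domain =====

-- B builds the matrix from two precomputed row templates instead of a per-cell branch (objective: simpler).

-- ===== PORT A =====
def generar_mapa_carretera (filas : Int) (columnas : Int) : List (List Int) :=
  (PySem.List.pyRange 0 filas 1).foldl (fun mapa i =>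
    mapa ++ [(PySem.List.pyRange 0 columnas 1).foldl (fun fila j =>
      if PySem.Int.mod i 2 = 0 ∧ PySem.Int.mod j 3 = 0 then fila ++ [(1 : Int)]
      else fila ++ [(0 : Int)]) []]) []

-- ===== PORT B =====
def generar_mapa_carretera_alt (filas : Int) (columnas : Int) : List (List Int) :=
  if filas ≤ 0 then [] else
  let fila_par : List Int :=
    (PySem.List.pyRange 0 columnas 1).map (fun j => if PySem.Int.mod j 3 = 0 then (1 : Int) else 0)
  let fila_cero : List Int :=
    (PySem.List.pyRange 0 columnas 1).map (fun _ => (0 : Int))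
  (PySem.List.pyRange 0 filas 1).map (fun i =>
    if PySem.Int.mod i 2 = 0 then fila_par else fila_cero)

-- ===== PRECONDITION & SPEC =====
def Spec_generar_mapa_carretera (filas : Int) (columnas : Int) (out : List (List Int)) : Prop := out = generar_mapa_carretera_alt filas columnas
instance (filas : Int) (columnas : Int) (out : List (List Int)) : Decidable (Spec_generar_mapa_carretera filas columnas out) := by unfold Spec_generar_mapa_carretera; infer_instance

-- ===== CLAIM (what is proved, stated in full; the proofs are below) =====
def Claim_equal_generar_mapa_carretera : Prop := ∀ (filas : Int) (columnas : Int), Dom_generar_mapa_carretera filas columnas → Spec_generar_mapa_carretera filas columnas (generar_mapa_carretera filas columnas)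

-- ===== LEMMAS AND PROOFS =====

theorem inner_row_eq (i columnas : Int) :
    (PySem.List.pyRange 0 columnas 1).foldl (fun fila j =>
      if PySem.Int.mod i 2 = 0 ∧ PySem.Int.mod j 3 = 0 then fila ++ [(1 : Int)]
      else fila ++ [(0 : Int)]) []
    = if PySem.Int.mod i 2 = 0 then
        (PySem.List.pyRange 0 columnas 1).map (fun j => if PySem.Int.mod j 3 = 0 then (1 : Int) else 0)
      else
        (PySem.List.pyRange 0 columnas 1).map (fun _ => (0 : Int)) := by
  have hstep : (PySem.List.pyRange 0 columnas 1).foldl (fun fila j =>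
      if PySem.Int.mod i 2 = 0 ∧ PySem.Int.mod j 3 = 0 then fila ++ [(1 : Int)]
      else fila ++ [(0 : Int)]) []
    = (PySem.List.pyRange 0 columnas 1).foldl (fun fila j =>
      fila ++ [if PySem.Int.mod i 2 = 0 ∧ PySem.Int.mod j 3 = 0 then (1 : Int) else 0]) [] := by
    apply PySem.List.foldl_congr_mem
    intro acc x _
    split <;> rfl
  rw [hstep, PySem.List.foldl_append_singleton_eq_map, List.nil_append]
  by_cases hi : PySem.Int.mod i 2 = 0
  · rw [if_pos hi]
    exact List.map_congr_left (fun j _ => by rw [if_congr ⟨fun h => h.2, fun h => ⟨hi, h⟩⟩ rfl rfl])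
  · rw [if_neg hi]
    exact List.map_congr_left (fun j _ => if_neg (fun h => hi h.1))

theorem generar_mapa_carretera_spec : Claim_equal_generar_mapa_carretera := by
  intro filas columnas _
  unfold Spec_generar_mapa_carretera generar_mapa_carretera generar_mapa_carretera_alt
  by_cases hf : filas ≤ 0
  · rw [if_pos hf, PySem.List.pyRange_one_eq_nil hf]
    rfl
  · rw [if_neg hf, PySem.List.foldl_append_singleton_eq_map]
    simp only [List.nil_append]
    exact List.map_congr_left (fun i _ => inner_row_eq i columnas)
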